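-- pv_equiv track=rewrite | github.com/MrBrantCode/unitest_baseline | mut_generate/mist_train_cf/cf_21036/solution.py | spell_vowels
-- ===== SOURCE A (Python) =====
-- def spell_vowels(word):
--     vowels = "aeiou"
--     result = ""
--     used_vowels = set()
--
--     for char in word:
--         if char.lower() in vowels and char.lower() not in used_vowels:
--             result += char.lower()
--             used_vowels.add(char.lower())
--
--     return result
-- ===== SOURCE B (Python) =====
-- def spell_vowels(word):
--     hits = []
--     for v in "aeiou":
--         for i, ch in enumerate(word):
--             if ch.lower() == v:
--                 hits.append((i, v))
--                 break
--     hits.sort(key=lambda t: t[0])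
--     return "".join(v for _, v in hits)
-- ===== Notes on version B (the rewrite author's own statement) =====
-- stated objective: alternative
-- what changed: A streams once over the word maintaining a seen-set and appending new vowels; B instead scans per vowel for its first index (5 passes), collects (index, vowel) pairs and sorts them by position before joining.
import Mathlib
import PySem

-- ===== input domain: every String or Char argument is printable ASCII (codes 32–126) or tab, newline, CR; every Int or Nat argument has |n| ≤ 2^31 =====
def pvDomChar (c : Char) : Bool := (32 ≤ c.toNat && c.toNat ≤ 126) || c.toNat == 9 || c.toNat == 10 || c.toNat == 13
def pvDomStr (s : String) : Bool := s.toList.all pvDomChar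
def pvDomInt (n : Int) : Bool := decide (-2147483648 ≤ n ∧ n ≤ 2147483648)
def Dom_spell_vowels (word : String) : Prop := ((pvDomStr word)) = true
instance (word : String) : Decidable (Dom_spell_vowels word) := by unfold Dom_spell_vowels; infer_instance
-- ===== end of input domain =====

-- B replaces A's single streaming dedup pass with a per-vowel first-index scan
-- followed by a sort by position (objective: alternative decomposition, same cost).

-- ===== PORT A =====
def spell_vowels (word : String) : String :=
  let vowels : List Char := ['a', 'e', 'i', 'o', 'u']
  let st := word.toList.foldl
    (fun (st : List Char × PySem.Set Char) char =>
      let lc := PySem.Chars.lowerChar char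
      if vowels.contains lc && !(PySem.Set.contains st.2 lc) then
        (st.1 ++ [lc], PySem.Set.add st.2 lc)
      else st)
    ([], PySem.Set.empty)
  String.ofList st.1

-- ===== PORT B =====
-- the inner 'for i, ch in enumerate(word): if ch.lower() == v: … break' loop
def svFind (cs : List Char) (v : Char) (i : Nat) : Option Nat :=
  match cs with
  | [] => none
  | c :: t => if PySem.Chars.lowerChar c = v then some i else svFind t v (i + 1)

def spell_vowels_alt (word : String) : String :=
  let hits := (['a', 'e', 'i', 'o', 'u']).foldl
    (fun (acc : List (Nat × Char)) v =>
      match svFind word.toList v 0 with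
      | some i => acc ++ [(i, v)]
      | none => acc) []
  let sortedHits := PySem.List.sorted hits (fun t => t.1) false
  String.ofList (sortedHits.map (fun t => t.2))

-- ===== PRECONDITION & SPEC =====
def Spec_spell_vowels (word : String) (out : String) : Prop := out = spell_vowels_alt word
instance (word : String) (out : String) : Decidable (Spec_spell_vowels word out) := by unfold Spec_spell_vowels; infer_instance

-- ===== CLAIM (what is proved, stated in full; the proofs are below) =====
def Claim_equal_spell_vowels : Prop := ∀ (word : String), Dom_spell_vowels word → Spec_spell_vowels word (spell_vowels word)

-- ===== LEMMAS AND PROOFS =====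

-- canonical middle form: first-occurrence dedup of the vowels of a (lowercased) char list,
-- parametrised by the set of already-emitted chars (as a Bool predicate)
def canP (mem : Char → Bool) : List Char → List Char
  | [] => []
  | c :: t =>
      if (['a', 'e', 'i', 'o', 'u'] : List Char).contains c && !mem c then
        c :: canP (fun x => mem x || (x == c)) t
      else canP mem t

theorem sv_contains_add (s : PySem.Set Char) (c x : Char) (hc : PySem.Set.contains s c = false) :
    PySem.Set.contains (PySem.Set.add s c) x = (PySem.Set.contains s x || (x == c)) := by
  simp only [PySem.Set.add, PySem.Set.contains] at *
  split_ifs with h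
  · simp at hc; simp [hc] at h
  · by_cases hxc : x = c <;> simp [hxc]

-- A's fold computes canP of the lowercased character list
theorem sv_foldA (cs : List Char) (r : List Char) (s : PySem.Set Char)
    (h : ∀ c, PySem.Set.contains s c = r.contains c) :
    (cs.foldl
      (fun (st : List Char × PySem.Set Char) char =>
        let lc := PySem.Chars.lowerChar char
        if (['a', 'e', 'i', 'o', 'u'] : List Char).contains lc && !(PySem.Set.contains st.2 lc) then
          (st.1 ++ [lc], PySem.Set.add st.2 lc)
        else st)
      (r, s)).1
    = r ++ canP (fun c => r.contains c) (cs.map PySem.Chars.lowerChar) := by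
  induction cs generalizing r s with
  | nil => simp [canP]
  | cons c t ih =>
    simp only [List.foldl_cons, List.map_cons, canP]
    rw [h]
    by_cases hc : ((['a', 'e', 'i', 'o', 'u'] : List Char).contains (PySem.Chars.lowerChar c)
        && !(r.contains (PySem.Chars.lowerChar c))) = true
    · rw [if_pos hc, if_pos hc]
      have hs : PySem.Set.contains s (PySem.Chars.lowerChar c) = false := by
        rw [h]
        simp only [Bool.and_eq_true, Bool.not_eq_true'] at hc
        exact hc.2
      rw [ih (r ++ [PySem.Chars.lowerChar c]) _ (fun x => by
        rw [sv_contains_add s _ x hs, h]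
        by_cases hx : x = PySem.Chars.lowerChar c <;> simp [hx])]
      have : (fun x => (r ++ [PySem.Chars.lowerChar c]).contains x)
          = (fun x => r.contains x || (x == PySem.Chars.lowerChar c)) := by
        funext x
        by_cases hx : x = PySem.Chars.lowerChar c <;> simp [hx]
      rw [this, List.append_assoc]
      rfl
    · rw [if_neg hc, if_neg hc]
      exact ih r s h

-- B's inner loop is the first index of v in the lowercased list
theorem sv_find_eq (cs : List Char) (v : Char) (i : Nat) :
    svFind cs v i = Option.map (· + i) (PySem.List.index? (cs.map PySem.Chars.lowerChar) v) := by
  induction cs generalizing i with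
  | nil => simp [svFind, PySem.List.index?_eq_idxOf?]
  | cons c t ih =>
    by_cases hc : PySem.Chars.lowerChar c = v
    · rw [List.map_cons, hc, PySem.List.index?_cons_self]
      simp [svFind, hc]
    · rw [List.map_cons, PySem.List.index?_cons_of_ne _ hc]
      simp only [svFind, if_neg hc, ih (i + 1), Option.map_map]
      cases PySem.List.index? (t.map PySem.Chars.lowerChar) v <;> simp
      omega

-- B's outer loop is a filterMap over the vowels
theorem sv_foldB (l : List Char) (acc : List (Nat × Char)) (g : Char → Option Nat) :
    l.foldl (fun acc v => match g v with | some i => acc ++ [(i, v)] | none => acc) acc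
      = acc ++ l.filterMap (fun v => Option.map (fun i => (i, v)) (g v)) := by
  induction l generalizing acc with
  | nil => simp
  | cons c t ih => cases hg : g c <;> simp [hg, ih]

theorem sv_index_mem (cs : List Char) (v : Char) (h : v ∈ cs) :
    PySem.List.index? cs v = some (cs.idxOf v) := by
  induction cs with
  | nil => simp at h
  | cons c t ih =>
    by_cases hc : c = v
    · subst hc; rw [PySem.List.index?_cons_self, List.idxOf_cons_self]
    · have hv : v ∈ t := by
        rcases List.mem_cons.mp h with h' | h'
        · exact absurd h'.symm hc
        · exact h'
      rw [PySem.List.index?_cons_of_ne _ hc, ih hv, List.idxOf_cons_ne _ hc]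
      rfl

theorem sv_mem_canP (cs : List Char) (mem : Char → Bool) (v : Char) :
    v ∈ canP mem cs ↔ (v ∈ (['a', 'e', 'i', 'o', 'u'] : List Char) ∧ v ∈ cs ∧ mem v = false) := by
  induction cs generalizing mem with
  | nil => simp [canP]
  | cons c t ih =>
    rw [canP]
    split_ifs with h
    · simp only [Bool.and_eq_true, List.contains_eq_mem, decide_eq_true_eq, Bool.not_eq_true'] at h
      by_cases hv : v = c
      · subst hv
        simp [h.1, h.2]
      · simp only [List.mem_cons, ih]
        constructor
        · rintro (h' | ⟨h1, h2, h3⟩)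
          · exact absurd h' hv
          · simp only [Bool.or_eq_false_iff, beq_eq_false_iff_ne] at h3
            exact ⟨h1, Or.inr h2, h3.1⟩
        · rintro ⟨h1, h2 | h2, h3⟩
          · exact absurd h2 hv
          · exact Or.inr ⟨h1, h2, by simp [h3, hv]⟩
    · simp only [Bool.and_eq_true, List.contains_eq_mem, decide_eq_true_eq, Bool.not_eq_true',
        not_and] at h
      rw [ih]
      by_cases hv : v = c
      · subst hv
        constructor
        · rintro ⟨h1, h2, h3⟩; exact ⟨h1, List.mem_cons.mpr (Or.inr h2), h3⟩
        · rintro ⟨h1, _, h3⟩; exact absurd (h h1) (by simp [h3])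
      · simp [hv]

theorem sv_nodup_canP (cs : List Char) (mem : Char → Bool) : (canP mem cs).Nodup := by
  induction cs generalizing mem with
  | nil => simp [canP]
  | cons c t ih =>
    rw [canP]
    split_ifs with h
    · refine List.nodup_cons.mpr ⟨fun hmem => ?_, ih _⟩
      have := (sv_mem_canP t _ c).mp hmem
      simp at this
    · exact ih mem

-- canP emits elements in order of first occurrence
theorem sv_pairwise_canP (cs : List Char) (mem : Char → Bool) :
    (canP mem cs).Pairwise (fun a b => cs.idxOf a < cs.idxOf b) := by
  induction cs generalizing mem with
  | nil => simp [canP]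
  | cons c t ih =>
    rw [canP]
    split_ifs with h
    · refine List.pairwise_cons.mpr ⟨fun b hb => ?_, ?_⟩
      · have hb' := (sv_mem_canP t _ b).mp hb
        have hbc : b ≠ c := by
          rcases hb' with ⟨_, _, h3⟩
          intro he; subst he; simp at h3
        rw [List.idxOf_cons_self, List.idxOf_cons_ne _ (Ne.symm hbc)]
        omega
      · refine (ih _).imp_of_mem ?_
        intro a b ha hb hab
        have hac : a ≠ c := by
          rcases (sv_mem_canP t _ a).mp ha with ⟨_, _, h3⟩
          intro he; subst he; simp at h3
        have hbc : b ≠ c := by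
          rcases (sv_mem_canP t _ b).mp hb with ⟨_, _, h3⟩
          intro he; subst he; simp at h3
        rw [List.idxOf_cons_ne _ (Ne.symm hac), List.idxOf_cons_ne _ (Ne.symm hbc)]
        omega
    · simp only [Bool.and_eq_true, List.contains_eq_mem, decide_eq_true_eq, Bool.not_eq_true',
        not_and] at h
      refine (ih mem).imp_of_mem ?_
      intro a b ha hb hab
      have hne : ∀ x ∈ canP mem t, x ≠ c := by
        intro x hx he
        rcases (sv_mem_canP t mem x).mp hx with ⟨h1, _, h3⟩
        subst he
        exact absurd (h h1) (by simp [h3])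
      rw [List.idxOf_cons_ne _ (Ne.symm (hne a ha)), List.idxOf_cons_ne _ (Ne.symm (hne b hb))]
      omega

-- ===== VERDICT (by name: the statement is the Claim_ definition above) =====
theorem spell_vowels_spec : Claim_equal_spell_vowels := by
  intro word _
  show spell_vowels word = spell_vowels_alt word
  have hempty : ∀ c : Char, PySem.Set.contains (PySem.Set.empty : PySem.Set Char) c
      = ([] : List Char).contains c := by
    intro c; simp [PySem.Set.empty, PySem.Set.contains]
  set ls : List Char := word.toList.map PySem.Chars.lowerChar with hls
  set out : List Char := canP (fun c => ([] : List Char).contains c) ls with hout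
  set ys : List (Nat × Char) := out.map (fun v => (ls.idxOf v, v)) with hys
  set hits : List (Nat × Char) := (['a', 'e', 'i', 'o', 'u'] : List Char).filterMap
      (fun v => Option.map (fun i => (i, v)) (PySem.List.index? ls v)) with hhits
  -- A side
  have hA : spell_vowels word = String.ofList ([] ++ out) :=
    congrArg String.ofList (sv_foldA word.toList [] PySem.Set.empty hempty)
  rw [List.nil_append] at hA
  -- B side
  have hfold : (['a', 'e', 'i', 'o', 'u'] : List Char).foldl
      (fun acc v => match svFind word.toList v 0 with
        | some i => acc ++ [(i, v)] | none => acc) [] = hits := by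
    have hstep : (fun (acc : List (Nat × Char)) v => match svFind word.toList v 0 with
          | some i => acc ++ [(i, v)] | none => acc)
        = (fun (acc : List (Nat × Char)) v => match PySem.List.index? ls v with
          | some i => acc ++ [(i, v)] | none => acc) := by
      funext acc v
      rw [sv_find_eq]
      cases PySem.List.index? ls v <;> simp
    rw [hstep]
    exact (sv_foldB _ [] _).trans (List.nil_append _)
  have hB : spell_vowels_alt word
      = String.ofList ((PySem.List.sorted hits (fun t => t.1) false).map (fun t => t.2)) := by
    have h := congrArg (fun (l : List (Nat × Char)) =>
      String.ofList ((PySem.List.sorted l (fun t : Nat × Char => t.1) false).map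
        (fun t : Nat × Char => t.2))) hfold
    exact h
  -- membership of ys and hits coincide
  have hmemiff : ∀ x, x ∈ ys ↔ x ∈ hits := by
    intro x
    constructor
    · intro hx
      rcases List.mem_map.mp hx with ⟨v, hv, rfl⟩
      rcases (sv_mem_canP ls _ v).mp hv with ⟨h1, h2, _⟩
      refine List.mem_filterMap.mpr ⟨v, h1, ?_⟩
      show Option.map (fun i => (i, v)) (PySem.List.index? ls v) = some (ls.idxOf v, v)
      rw [sv_index_mem ls v h2]
      rfl
    · intro hx
      rcases List.mem_filterMap.mp hx with ⟨v, hv, hfv⟩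
      rcases Option.map_eq_some_iff.mp hfv with ⟨i, hidx, rfl⟩
      rcases PySem.List.getElem_of_index?_eq_some hidx with ⟨hk, hget, -⟩
      have hmem : v ∈ ls := hget ▸ List.getElem_mem hk
      have hi : i = ls.idxOf v := by
        rw [sv_index_mem ls v hmem] at hidx
        exact (Option.some.inj hidx).symm
      subst hi
      exact List.mem_map.mpr ⟨v, (sv_mem_canP ls _ v).mpr ⟨hv, hmem, by simp⟩, rfl⟩
  have hysnd : ys.Nodup :=
    (sv_nodup_canP ls _).map (fun a b h => congrArg Prod.snd h)
  have hhitsnd : hits.Nodup := by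
    refine List.Nodup.filterMap ?_ (by decide)
    intro a a' b hb hb'
    rcases Option.map_eq_some_iff.mp (Option.mem_def.mp hb) with ⟨i, _, rfl⟩
    rcases Option.map_eq_some_iff.mp (Option.mem_def.mp hb') with ⟨i', _, h2⟩
    exact (congrArg Prod.snd h2).symm
  have hperm : ys.Perm hits :=
    List.perm_of_nodup_nodup_toFinset_eq hysnd hhitsnd
      (Finset.ext fun x => by simp only [List.mem_toFinset]; exact hmemiff x)
  have hpair : ys.Pairwise (fun a b => a.1 < b.1) := by
    rw [hys, List.pairwise_map]
    exact sv_pairwise_canP ls _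
  have hsorted : PySem.List.sorted hits (fun t => t.1) false = ys :=
    PySem.List.sorted_eq_of_perm_of_pairwise_lt hits ys _ hperm hpair
  rw [hA, hB, hsorted, hys, List.map_map]
  have hcomp : ((fun t : Nat × Char => t.2) ∘ fun v => (ls.idxOf v, v)) = fun v => v := rfl
  rw [hcomp, List.map_id']
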